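-- pv_equiv track=rewrite | github.com/Savely-Prokhorov/DifferentPythonSolutions | UniLecsTasks/28. SiblingStrings.py | are_siblings
-- ===== SOURCE A (Python) =====
-- def generate_ind_list(i, s_length):
--     # если число нечетное
--     if i % 2 == 0:
--         arr = [i for i in range(0, s_length, 2)]
--     # если четное
--     else:
--         arr = [i for i in range(1, s_length, 2)]
--     return arr
--
-- def are_siblings(s1, s2):
--     if len(s1) == len(s2):
--         for i in range(len(s1)):
--             # если данный символ есть во второй строке
--             if s1[i] in s2:
--                 # на местах той же четности ищем тот же символ
--                 count = 0
--                 for j in generate_ind_list(i, len(s2)):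
--                     if s1[i] == s2[j]:
--                         count += 1
--                 if count == 0:
--                     return False
--     else:
--         return False
--     return True
-- ===== SOURCE B (Python) =====
-- def are_siblings(s1, s2):
--     if len(s1) != len(s2):
--         return False
--     e1, o1 = set(s1[0::2]), set(s1[1::2])
--     e2, o2 = set(s2[0::2]), set(s2[1::2])
--     all2 = set(s2)
--     return (e1 & all2) <= e2 and (o1 & all2) <= o2
-- ===== Notes on version B (the rewrite author's own statement) =====
-- stated objective: faster
-- what changed: Replaces the per-position nested scan (for each character of s1, counting same-parity matches in s2 via a generated index list) with parity-sliced character sets and two subset checks intersected with set(s2).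
import Mathlib
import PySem

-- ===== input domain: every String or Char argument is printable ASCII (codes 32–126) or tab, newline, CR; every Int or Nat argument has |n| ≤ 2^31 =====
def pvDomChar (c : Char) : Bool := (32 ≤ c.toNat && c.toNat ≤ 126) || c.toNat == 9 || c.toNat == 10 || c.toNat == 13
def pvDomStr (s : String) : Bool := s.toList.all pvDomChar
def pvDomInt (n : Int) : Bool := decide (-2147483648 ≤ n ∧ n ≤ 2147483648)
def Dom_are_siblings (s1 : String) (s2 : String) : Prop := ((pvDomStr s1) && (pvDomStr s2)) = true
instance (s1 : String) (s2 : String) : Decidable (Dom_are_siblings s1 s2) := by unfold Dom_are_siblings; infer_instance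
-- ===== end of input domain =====

-- B replaces A's per-position nested scan by parity-sliced character sets and two subset checks (objective: faster).

-- ===== PORT A =====
def generate_ind_list (i : Int) (s_length : Int) : List Int :=
  if PySem.Int.mod i 2 == 0 then PySem.List.pyRange 0 s_length 2
  else PySem.List.pyRange 1 s_length 2

-- A's inner 'for j in generate_ind_list(...)' counting loop
def pvCount (ch : Char) (c2 : List Char) (idxs : List Int) : Int :=
  idxs.foldl (fun count j => if PySem.List.pyGet? c2 j == some ch then count + 1 else count) 0

-- A's outer 'for i in range(len(s1))' loop, with the early 'return False'
def pvALoop (c2 : List Char) : List Char → Int → Bool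
  | [], _ => true
  | ch :: rest, i =>
    if c2.contains ch then
      if pvCount ch c2 (generate_ind_list i (c2.length : Int)) == 0 then false
      else pvALoop c2 rest (i + 1)
    else pvALoop c2 rest (i + 1)

def are_siblings (s1 : String) (s2 : String) : Bool :=
  if s1.toList.length == s2.toList.length then pvALoop s2.toList s1.toList 0
  else false

-- ===== PORT B =====
-- set(s[p::2]) for p = 0 or 1 (step 2 ≠ 0, so slice? always returns a value)
def pvParSet (cs : List Char) (p : Int) : PySem.Set Char :=
  PySem.Set.ofList ((PySem.List.slice? cs (some p) none 2).getD [])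

def are_siblings_alt (s1 : String) (s2 : String) : Bool :=
  let c1 := s1.toList
  let c2 := s2.toList
  if c1.length != c2.length then false
  else
    let e1 := pvParSet c1 0
    let o1 := pvParSet c1 1
    let e2 := pvParSet c2 0
    let o2 := pvParSet c2 1
    let all2 := PySem.Set.ofList c2
    PySem.Set.issubset (PySem.Set.inter e1 all2) e2 &&
      PySem.Set.issubset (PySem.Set.inter o1 all2) o2

-- ===== PRECONDITION & SPEC =====
def Spec_are_siblings (s1 : String) (s2 : String) (out : Bool) : Prop := out = are_siblings_alt s1 s2
instance (s1 : String) (s2 : String) (out : Bool) : Decidable (Spec_are_siblings s1 s2 out) := by unfold Spec_are_siblings; infer_instance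

-- ===== CLAIM (what is proved, stated in full; the proofs are below) =====
def Claim_equal_are_siblings : Prop := ∀ (s1 : String) (s2 : String), Dom_are_siblings s1 s2 → Spec_are_siblings s1 s2 (are_siblings s1 s2)

-- ===== LEMMAS AND PROOFS =====

-- 'ch occurs in c at a position of parity p'
def pvM (cs : List Char) (p : Nat) (ch : Char) : Prop :=
  ∃ j : Nat, j % 2 = p ∧ cs[j]? = some ch

-- the parity slice xs[p::2] as a filterMap over a range
lemma pv_slice_eq (xs : List Char) (p : Nat) (hp : p ≤ 1) :
    (PySem.List.slice? xs (some (p : Int)) none 2).getD [] =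
      List.filterMap (fun k => xs[(p + 2 * k : Nat)]?)
        (List.range (if p < xs.length then (xs.length - p + 1) / 2 else 0)) := by
  have h0 : ¬ ((2 : Int) = 0) := by norm_num
  have h1 : ¬ ((2 : Int) < 0) := by norm_num
  have h2 : ¬ ((p : Int) < 0) := by omega
  have h3 : (0 : Int) < 2 := by norm_num
  simp only [PySem.List.slice?, PySem.List.sliceIndices, if_neg h0, if_neg h1, if_neg h2,
    if_pos h3, Option.getD_some]
  by_cases hpn : p < xs.length
  · have hmin : min (p : Int) (xs.length : Int) = (p : Int) := by omega
    have hlt : ((p : Int)) < (xs.length : Int) := by omega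
    have hA : ((xs.length : Int) - (p : Int) + 2 - 1) = ((xs.length - p + 1 : Nat) : Int) := by omega
    have hdiv : ((((xs.length - p + 1 : Nat) : Int)) / 2).toNat = (xs.length - p + 1) / 2 := by
      omega
    have hfun : (fun k : Nat => xs[((p : Int) + 2 * (k : Int)).toNat]?) =
        (fun k : Nat => xs[(p + 2 * k : Nat)]?) := by
      funext k; congr 1
    rw [hmin, if_pos hlt, hA, hdiv, if_pos hpn, hfun]
  · have hmin : min (p : Int) (xs.length : Int) = (xs.length : Int) := by omega
    have hlt : ¬ ((xs.length : Int) < (xs.length : Int)) := by omega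
    rw [hmin, if_neg hlt, if_neg hpn]; simp

-- membership in the parity slice xs[p::2]
lemma pv_mem_parity_slice (xs : List Char) (p : Nat) (hp : p ≤ 1) (ch : Char) :
    ch ∈ (PySem.List.slice? xs (some (p : Int)) none 2).getD [] ↔ pvM xs p ch := by
  rw [pv_slice_eq xs p hp]
  by_cases hpn : p < xs.length
  · simp only [if_pos hpn, List.mem_filterMap, List.mem_range, pvM]
    constructor
    · rintro ⟨k, hk, hval⟩
      exact ⟨p + 2 * k, by omega, hval⟩
    · rintro ⟨j, hpar, hval⟩
      have hj : j < xs.length := (List.getElem?_eq_some_iff.mp hval).1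
      refine ⟨(j - p) / 2, by omega, ?_⟩
      have he : p + 2 * ((j - p) / 2) = j := by omega
      rw [he]
      exact hval
  · simp only [if_neg hpn, List.range_zero, List.filterMap_nil, List.not_mem_nil, false_iff, pvM]
    rintro ⟨j, hpar, hval⟩
    have hj : j < xs.length := (List.getElem?_eq_some_iff.mp hval).1
    omega

-- generate_ind_list at index p is range(p, len, 2) for p = 0 or 1
lemma pv_gen_eq (p : Nat) (hp : p ≤ 1) (L : Int) :
    generate_ind_list (p : Int) L = PySem.List.pyRange (p : Int) L 2 := by
  rcases Nat.le_one_iff_eq_zero_or_eq_one.mp hp with rfl | rfl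
  · simp only [generate_ind_list, Nat.cast_zero]
    rw [if_pos (by decide)]
  · simp only [generate_ind_list, Nat.cast_one]
    rw [if_neg (by decide)]

-- generate_ind_list only depends on the parity of i
lemma pv_gen_parity (i : Nat) (L : Int) :
    generate_ind_list (i : Int) L = generate_ind_list ((i % 2 : Nat) : Int) L := by
  have hmod : PySem.Int.mod (i : Int) 2 = ((i % 2 : Nat) : Int) := by
    exact_mod_cast PySem.Int.mod_natCast i 2
  have hmod2 : PySem.Int.mod ((i % 2 : Nat) : Int) 2 = ((i % 2 % 2 : Nat) : Int) := by
    exact_mod_cast PySem.Int.mod_natCast (i % 2) 2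
  simp only [generate_ind_list, hmod, hmod2]
  rcases Nat.mod_two_eq_zero_or_one i with h | h <;> simp [h]

-- A's inner counting loop is non-zero exactly when a same-parity match exists
lemma pv_count_ne_zero (ch : Char) (c2 : List Char) (p : Nat) (hp : p ≤ 1) :
    ¬ pvCount ch c2 (generate_ind_list (p : Int) (c2.length : Int)) = 0 ↔ pvM c2 p ch := by
  rw [pv_gen_eq p hp, pvCount, PySem.List.foldl_count_if]
  simp only [zero_add, Int.natCast_eq_zero, List.countP_eq_zero, not_forall]
  constructor
  · rintro ⟨x, hx, hpred⟩
    rw [PySem.List.mem_pyRange_iff_of_pos (by norm_num)] at hx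
    obtain ⟨hx1, hx2, hx3⟩ := hx
    have hxe : x = ((x.toNat : Nat) : Int) := by omega
    rw [not_not, beq_iff_eq] at hpred
    rw [hxe, PySem.List.pyGet?_natCast] at hpred
    exact ⟨x.toNat, by omega, hpred⟩
  · rintro ⟨j, hpar, hval⟩
    have hj : j < c2.length := (List.getElem?_eq_some_iff.mp hval).1
    refine ⟨(j : Int), ?_, ?_⟩
    · rw [PySem.List.mem_pyRange_iff_of_pos (by norm_num)]
      exact ⟨by omega, by omega, by omega⟩
    · rw [not_not, beq_iff_eq, PySem.List.pyGet?_natCast]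
      exact hval

-- characterisation of A's outer loop
lemma pv_aloop_iff (c2 : List Char) (rest : List Char) (i : Nat) :
    pvALoop c2 rest (i : Int) = true ↔
      ∀ k : Nat, (hk : k < rest.length) → rest[k] ∈ c2 → pvM c2 ((i + k) % 2) rest[k] := by
  induction rest generalizing i with
  | nil => simp [pvALoop]
  | cons ch rest ih =>
    have hcast : ((i : Int) + 1) = ((i + 1 : Nat) : Int) := by push_cast; ring
    have hcnt := pv_count_ne_zero ch c2 (i % 2) (by omega)
    have hgen := pv_gen_parity i (c2.length : Int)
    have hsplit : (∀ k : Nat, (hk : k < (ch :: rest).length) → (ch :: rest)[k] ∈ c2 →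
        pvM c2 ((i + k) % 2) (ch :: rest)[k]) ↔
        ((ch ∈ c2 → pvM c2 (i % 2) ch) ∧
         (∀ k : Nat, (hk : k < rest.length) → rest[k] ∈ c2 → pvM c2 ((i + 1 + k) % 2) rest[k])) := by
      constructor
      · intro h
        refine ⟨fun hm => by simpa using h 0 (by simp) (by simpa using hm), ?_⟩
        intro k hk hm
        have he : i + 1 + k = i + (k + 1) := by omega
        have := h (k + 1) (by simpa using Nat.succ_lt_succ hk) (by simpa using hm)
        rw [he]
        simpa using this
      · rintro ⟨h0, h1⟩ k hk hm
        cases k with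
        | zero => simpa using h0 (by simpa using hm)
        | succ k =>
          have he : i + (k + 1) = i + 1 + k := by omega
          have := h1 k (by simpa using hk) (by simpa using hm)
          rw [he]
          simpa using this
    rw [hsplit]
    simp only [pvALoop]
    by_cases hc2 : c2.contains ch = true
    · rw [if_pos hc2]
      by_cases hz : (pvCount ch c2 (generate_ind_list (i : Int) (c2.length : Int)) == 0) = true
      · rw [if_pos hz]
        simp only [Bool.false_eq_true, false_iff, not_and]
        intro h0 _
        have hM := h0 (List.contains_iff_mem.mp hc2)
        rw [beq_iff_eq, hgen] at hz
        exact (hcnt.mpr hM) hz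
      · rw [if_neg hz, hcast, ih]
        rw [beq_iff_eq, hgen] at hz
        constructor
        · intro h
          exact ⟨fun _ => hcnt.mp (by simpa using hz), h⟩
        · exact fun h => h.2
    · rw [if_neg hc2, hcast, ih]
      constructor
      · intro h
        exact ⟨fun hm => absurd (List.contains_iff_mem.mpr hm) hc2, h⟩
      · exact fun h => h.2

-- characterisation of one of B's subset checks
lemma pv_subset_iff (c1 c2 : List Char) (p : Nat) (hp : p ≤ 1) :
    (PySem.Set.issubset (PySem.Set.inter (pvParSet c1 (p : Int)) (PySem.Set.ofList c2)) (pvParSet c2 (p : Int)) = true) ↔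
      ∀ ch, pvM c1 p ch → ch ∈ c2 → pvM c2 p ch := by
  simp only [PySem.Set.issubset, PySem.Set.inter, PySem.Set.contains, pvParSet,
    List.all_eq_true, List.mem_filter, List.contains_iff_mem, PySem.Set.mem_ofList,
    pv_mem_parity_slice _ _ hp, and_imp]

-- ===== VERDICT (by name: the statement is the Claim_ definition above) =====
theorem are_siblings_spec : Claim_equal_are_siblings := by
  intro s1 s2 _
  unfold Spec_are_siblings are_siblings are_siblings_alt
  by_cases h : s1.toList.length = s2.toList.length
  · simp only [h, beq_self_eq_true, if_true, bne_self_eq_false, Bool.false_eq_true, if_false]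
    rw [Bool.eq_iff_iff]
    have hloop := pv_aloop_iff s2.toList s1.toList 0
    rw [show ((0 : Nat) : Int) = (0 : Int) from rfl] at hloop
    have hs0 := pv_subset_iff s1.toList s2.toList 0 (by omega)
    have hs1 := pv_subset_iff s1.toList s2.toList 1 (by omega)
    rw [show ((0 : Nat) : Int) = (0 : Int) from rfl] at hs0
    rw [show ((1 : Nat) : Int) = (1 : Int) from rfl] at hs1
    rw [hloop, Bool.and_eq_true, hs0, hs1]
    constructor
    · intro hA
      constructor
      · rintro ch ⟨k, hpar, hch⟩ hmem
        have hk : k < s1.toList.length := (List.getElem?_eq_some_iff.mp hch).1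
        have hch' : s1.toList[k]'hk = ch := (List.getElem?_eq_some_iff.mp hch).2
        have hres := hA k hk (by rw [hch']; exact hmem)
        have h0 : (0 + k) % 2 = 0 := by omega
        rw [h0, hch'] at hres
        exact hres
      · rintro ch ⟨k, hpar, hch⟩ hmem
        have hk : k < s1.toList.length := (List.getElem?_eq_some_iff.mp hch).1
        have hch' : s1.toList[k]'hk = ch := (List.getElem?_eq_some_iff.mp hch).2
        have hres := hA k hk (by rw [hch']; exact hmem)
        have h0 : (0 + k) % 2 = 1 := by omega
        rw [h0, hch'] at hres
        exact hres
    · rintro ⟨hE, hO⟩ k hk hmem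
      rcases Nat.mod_two_eq_zero_or_one k with hpar | hpar
      · have hres := hE (s1.toList[k]'hk) ⟨k, hpar, List.getElem?_eq_getElem hk⟩ hmem
        have h0 : (0 + k) % 2 = 0 := by omega
        rw [h0]
        exact hres
      · have hres := hO (s1.toList[k]'hk) ⟨k, hpar, List.getElem?_eq_getElem hk⟩ hmem
        have h0 : (0 + k) % 2 = 1 := by omega
        rw [h0]
        exact hres
  · have hb : (s1.toList.length == s2.toList.length) = false := by simpa using h
    have hb' : (s1.toList.length != s2.toList.length) = true := by
      simp only [bne, hb, Bool.not_false]
    rw [if_neg (by simp only [hb]; exact Bool.false_ne_true), if_pos hb']
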